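-- pv_equiv track=rewrite | github.com/wzygxr/shuati | class102_AdvancedDynamicProgrammingAndCombinatorics/Code10_MinDaysToBloom.py | can_make_bouquets
-- ===== SOURCE A (Python) =====
-- def can_make_bouquets(bloom_day, m, k, days):
--     """
--     检查是否能在给定天数内制作出指定数量的花束
--     使用贪心算法实现
--
--     Args:
--         bloom_day (List[int]): 每朵花盛开的天数
--         m (int): 需要制作的花束数量
--         k (int): 每束花需要的相邻花朵数量
--         days (int): 给定的天数
--
--     Returns:
--         bool: 是否能在给定天数内制作出指定数量的花束
--
--     时间复杂度：O(n)
--     空间复杂度：O(1)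
--     """
--     bouquets = 0   # 已制作的花束数量
--     consecutive = 0 # 当前连续盛开的花朵数量
--
--     for day in bloom_day:
--         if day <= days:
--             # 如果当前花朵在给定天数内盛开
--             consecutive += 1
--
--             # 如果连续盛开的花朵数量达到了 k 朵，可以制作一束花
--             if consecutive == k:
--                 bouquets += 1
--                 consecutive = 0  # 重置连续计数
--         else:
--             # 如果当前花朵在给定天数内未盛开，重置连续计数
--             consecutive = 0
--
--     # 检查是否能制作出至少 m 束花
--     return bouquets >= m
-- ===== SOURCE B (Python) =====
-- def can_make_bouquets(bloom_day, m, k, days):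
--     """Group bloom_day into maximal runs of flowers bloomed by `days`,
--     then each run of length L yields L // k bouquets."""
--     if k <= 0:
--         # a bouquet needs a positive number of flowers, so none can be made
--         return 0 >= m
--     runs = []
--     n = len(bloom_day)
--     i = 0
--     while i < n:
--         if bloom_day[i] <= days:
--             j = i
--             while j < n and bloom_day[j] <= days:
--                 j += 1
--             runs.append(j - i)
--             i = j
--         else:
--             i += 1
--     return sum(L // k for L in runs) >= m
-- ===== Notes on version B (the rewrite author's own statement) =====
-- stated objective: alternative
-- what changed: Replaces the incremental count-and-reset-at-k scan with grouping the flowers into maximal bloomed runs and summing L // k over the run lengths (k <= 0 yields zero bouquets directly).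
import Mathlib
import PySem

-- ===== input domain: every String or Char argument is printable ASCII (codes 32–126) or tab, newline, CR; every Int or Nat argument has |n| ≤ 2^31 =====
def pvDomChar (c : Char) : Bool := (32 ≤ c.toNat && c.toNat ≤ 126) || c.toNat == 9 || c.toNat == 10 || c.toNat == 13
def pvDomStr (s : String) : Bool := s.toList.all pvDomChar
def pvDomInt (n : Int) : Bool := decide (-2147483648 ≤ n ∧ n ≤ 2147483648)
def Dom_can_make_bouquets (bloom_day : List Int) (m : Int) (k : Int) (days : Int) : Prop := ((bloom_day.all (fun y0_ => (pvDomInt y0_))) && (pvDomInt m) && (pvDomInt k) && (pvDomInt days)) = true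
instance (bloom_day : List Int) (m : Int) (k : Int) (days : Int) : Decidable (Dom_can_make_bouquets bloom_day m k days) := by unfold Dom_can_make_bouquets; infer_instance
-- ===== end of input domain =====

-- B replaces A's count-and-reset-at-k scan by collecting maximal bloomed-run lengths and summing L // k (alternative decomposition, same cost).

-- ===== PORT A =====
-- A's loop state: (bouquets, consecutive)
def can_make_bouquets (bloom_day : List Int) (m : Int) (k : Int) (days : Int) : Bool :=
  let st := bloom_day.foldl
    (fun (st : Int × Int) day =>
      if day ≤ days then
        if st.2 + 1 = k then (st.1 + 1, 0) else (st.1, st.2 + 1)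
      else (st.1, 0))
    (0, 0)
  decide (st.1 ≥ m)

-- ===== PORT B =====
-- inner `while j < n and bloom_day[j] <= days` loop: (run length taken, remainder of the list)
def altTakeRun (days : Int) : List Int → Nat × List Int
  | [] => (0, [])
  | d :: rest =>
    if d ≤ days then
      let p := altTakeRun days rest
      (p.1 + 1, p.2)
    else (0, d :: rest)

theorem altTakeRun_len (days : Int) (xs : List Int) :
    (altTakeRun days xs).2.length ≤ xs.length := by
  induction xs with
  | nil => simp [altTakeRun]
  | cons d rest ih =>
    by_cases h : d ≤ days
    · simp only [altTakeRun, if_pos h, List.length_cons]; omega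
    · simp [altTakeRun, h]

-- outer `while i < n` loop collecting the run lengths (Python ints, hence Int)
def altRuns (days : Int) : List Int → List Int
  | [] => []
  | d :: rest =>
    if d ≤ days then
      let p := altTakeRun days rest
      ((p.1 : Int) + 1) :: altRuns days p.2
    else altRuns days rest
termination_by xs => xs.length
decreasing_by
  · exact Nat.lt_succ_of_le (altTakeRun_len days rest)
  · simp

def can_make_bouquets_alt (bloom_day : List Int) (m : Int) (k : Int) (days : Int) : Bool :=
  if k ≤ 0 then
    decide ((0 : Int) ≥ m)
  else
    decide ((altRuns days bloom_day).foldl (fun acc L => acc + PySem.Int.floordiv L k) 0 ≥ m)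

-- ===== PRECONDITION & SPEC =====
def Spec_can_make_bouquets (bloom_day : List Int) (m : Int) (k : Int) (days : Int) (out : Bool) : Prop := out = can_make_bouquets_alt bloom_day m k days
instance (bloom_day : List Int) (m : Int) (k : Int) (days : Int) (out : Bool) : Decidable (Spec_can_make_bouquets bloom_day m k days out) := by unfold Spec_can_make_bouquets; infer_instance

-- ===== CLAIM (what is proved, stated in full; the proofs are below) =====
def Claim_equal_can_make_bouquets : Prop := ∀ (bloom_day : List Int) (m : Int) (k : Int) (days : Int), Dom_can_make_bouquets bloom_day m k days → Spec_can_make_bouquets bloom_day m k days (can_make_bouquets bloom_day m k days)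

-- ===== LEMMAS AND PROOFS =====
-- A's loop body, abbreviated for the lemmas
def stepA (k days : Int) : Int × Int → Int → Int × Int :=
  fun st day =>
    if day ≤ days then
      if st.2 + 1 = k then (st.1 + 1, 0) else (st.1, st.2 + 1)
    else (st.1, 0)

theorem foldA_eq (bloom_day : List Int) (m k days : Int) :
    can_make_bouquets bloom_day m k days
      = decide ((bloom_day.foldl (stepA k days) (0, 0)).1 ≥ m) := rfl

-- k ≤ 0: A's `consecutive + 1 == k` test never fires, bouquets stays put
theorem foldA_nonpos (k days : Int) (hk : k ≤ 0) (xs : List Int) :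
    ∀ b c : Int, 0 ≤ c → (xs.foldl (stepA k days) (b, c)).1 = b := by
  induction xs with
  | nil => intro b c _; rfl
  | cons d rest ih =>
    intro b c hc
    by_cases h : d ≤ days
    · have hne : ¬ (c + 1 = k) := by omega
      simpa [stepA, h, hne] using ih b (c + 1) (by omega)
    · simpa [stepA, h] using ih b 0 le_rfl

-- the remainder left by altTakeRun is empty or starts with an unbloomed day
theorem altTakeRun_rem (days : Int) (xs : List Int) :
    (altTakeRun days xs).2 = [] ∨
      ∃ e r', (altTakeRun days xs).2 = e :: r' ∧ ¬ e ≤ days := by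
  induction xs with
  | nil => left; rfl
  | cons d rest ih =>
    by_cases h : d ≤ days
    · simpa only [altTakeRun, if_pos h] using ih
    · right; exact ⟨d, rest, by simp [altTakeRun, h], h⟩

-- processing a maximal bloomed run of length n from state (b, c) adds (c+n)/k bouquets
theorem foldA_takeRun (k days : Int) (hk : 1 ≤ k) (xs : List Int) :
    ∀ b c : Int, 0 ≤ c → c < k →
      xs.foldl (stepA k days) (b, c)
        = (altTakeRun days xs).2.foldl (stepA k days)
            (b + (c + ((altTakeRun days xs).1 : Int)) / k, (c + ((altTakeRun days xs).1 : Int)) % k) := by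
  induction xs with
  | nil =>
    intro b c hc0 hck
    simp [altTakeRun, Int.ediv_eq_zero_of_lt hc0 hck, Int.emod_eq_of_lt hc0 hck]
  | cons d rest ih =>
    intro b c hc0 hck
    obtain ⟨np, rp, hnp⟩ : ∃ np rp, altTakeRun days rest = (np, rp) := ⟨_, _, rfl⟩
    by_cases h : d ≤ days
    · simp only [altTakeRun, if_pos h, hnp]
      push_cast
      by_cases hkc : c + 1 = k
      · simp only [List.foldl_cons, stepA, if_pos h, if_pos hkc]
        rw [ih (b + 1) 0 le_rfl (by omega), hnp]
        have e1 : c + ((np : Int) + 1) = (np : Int) + 1 * k := by omega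
        have hd : (0 : Int) + (np : Int) = (np : Int) := by ring
        rw [hd, e1, Int.add_mul_ediv_right _ _ (by omega : k ≠ 0)]
        have e2 : (np : Int) + 1 * k = (np : Int) + k * 1 := by ring
        rw [e2, Int.add_mul_emod_self_left]
        have hb : b + 1 + (np : Int) / k = b + ((np : Int) / k + 1) := by ring
        rw [hb]
      · simp only [List.foldl_cons, stepA, if_pos h, if_neg hkc]
        rw [ih b (c + 1) (by omega) (by omega), hnp]
        have : c + 1 + (np : Int) = c + ((np : Int) + 1) := by ring
        rw [this]
    · simp only [altTakeRun, if_neg h]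
      have h1 : (c + ((0 : Nat) : Int)) / k = 0 := by
        simpa using Int.ediv_eq_zero_of_lt hc0 hck
      have h2 : (c + ((0 : Nat) : Int)) % k = c := by
        simpa using Int.emod_eq_of_lt hc0 hck
      rw [h1, h2]
      simp

-- pull the accumulator out of B's sum-fold
theorem foldl_sum_init (k : Int) (runs : List Int) :
    ∀ a : Int, runs.foldl (fun acc L => acc + PySem.Int.floordiv L k) a
      = a + runs.foldl (fun acc L => acc + PySem.Int.floordiv L k) 0 := by
  induction runs with
  | nil => intro a; simp
  | cons L rest ih =>
    intro a
    simp only [List.foldl_cons]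
    rw [ih (a + _), ih (0 + _)]
    ring

-- main invariant: A's bouquet count from (b, 0) = b + Σ L // k over B's runs
theorem foldA_runs (k days : Int) (hk : 1 ≤ k) :
    ∀ xs : List Int, ∀ b : Int,
      (xs.foldl (stepA k days) (b, 0)).1
        = b + (altRuns days xs).foldl (fun acc L => acc + PySem.Int.floordiv L k) 0 := by
  intro xs
  induction hn : xs.length using Nat.strong_induction_on generalizing xs with
  | _ n ih =>
    intro b
    match xs with
    | [] => simp [altRuns]
    | d :: rest =>
      have hn' : rest.length + 1 = n := by simpa using hn
      by_cases h : d ≤ days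
      · obtain ⟨np, rp, hnp⟩ : ∃ np rp, altTakeRun days rest = (np, rp) := ⟨_, _, rfl⟩
        have hrun := foldA_takeRun k days hk (d :: rest) b 0 le_rfl (by omega)
        simp only [altTakeRun, if_pos h, hnp] at hrun
        push_cast at hrun
        have hz : (0 : Int) + ((np : Int) + 1) = (np : Int) + 1 := by ring
        rw [hz] at hrun
        have hlen : rp.length ≤ rest.length := by
          have := altTakeRun_len days rest
          rw [hnp] at this; exact this
        have hruns : altRuns days (d :: rest) = ((np : Int) + 1) :: altRuns days rp := by
          simp [altRuns, h, hnp]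
        have hfd : PySem.Int.floordiv ((np : Int) + 1) k = ((np : Int) + 1) / k :=
          PySem.Int.floordiv_eq_ediv_of_pos (by omega)
        have hsum : (altRuns days (d :: rest)).foldl (fun acc L => acc + PySem.Int.floordiv L k) 0
            = ((np : Int) + 1) / k + (altRuns days rp).foldl (fun acc L => acc + PySem.Int.floordiv L k) 0 := by
          rw [hruns]
          simp only [List.foldl_cons]
          rw [foldl_sum_init, hfd]
          ring
        rw [hsum]
        rcases altTakeRun_rem days (d :: rest) with he | ⟨e, r', her, hune⟩
        · simp only [altTakeRun, if_pos h, hnp] at he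
          rw [hrun, he]
          simp [altRuns]
        · simp only [altTakeRun, if_pos h, hnp] at her
          rw [hrun, her, List.foldl_cons]
          have hst : stepA k days (b + ((np : Int) + 1) / k, ((np : Int) + 1) % k) e
              = (b + ((np : Int) + 1) / k, 0) := by
            simp [stepA, hune]
          rw [hst]
          have hr'len : r'.length < n := by
            have : rp.length = r'.length + 1 := by rw [her]; simp
            omega
          rw [ih r'.length hr'len r' rfl (b + ((np : Int) + 1) / k)]
          have : altRuns days (e :: r') = altRuns days r' := by
            simp [altRuns, hune]
          rw [this]
          ring
      · simp only [List.foldl_cons, stepA, if_neg h]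
        rw [ih rest.length (by omega) rest rfl b]
        simp [altRuns, h]

-- ===== VERDICT (by name: the statement is the Claim_ definition above) =====
theorem can_make_bouquets_spec : Claim_equal_can_make_bouquets := by
  intro bloom_day m k days _
  unfold Spec_can_make_bouquets
  rw [foldA_eq]
  unfold can_make_bouquets_alt
  by_cases hk : k ≤ 0
  · rw [if_pos hk, foldA_nonpos k days hk bloom_day 0 0 le_rfl]
  · rw [if_neg hk, foldA_runs k days (by omega) bloom_day 0]
    simp
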